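-- pv_equiv track=rewrite | github.com/Melbride/cbc-kcse-guidance-chatbot | kcse/backend/conversation/adaptive_responses.py | _map_interests_to_careers
-- ===== SOURCE A (Python) =====
-- from typing import Dict, List, Optional
--
-- def _map_interests_to_careers(interests: str) -> List[str]:
--     """Map interests to career fields"""
--     interest_keywords = interests.lower().split()
--
--     career_mapping = {
--         'technology': ['Computer Science', 'Software Development', 'Data Science', 'Cybersecurity'],
--         'business': ['Business Administration', 'Finance', 'Marketing', 'Entrepreneurship'],
--         'medical': ['Medicine', 'Nursing', 'Pharmacy', 'Public Health'],
--         'teaching': ['Education', 'Teaching', 'Educational Administration'],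
--         'engineering': ['Engineering', 'Technical Fields', 'Architecture'],
--         'science': ['Research', 'Laboratory Science', 'Environmental Science']
--     }
--
--     suggested_careers = []
--     for keyword, careers in career_mapping.items():
--         if any(keyword in interest_keywords for keyword in [keyword] + careers):
--             suggested_careers.extend(careers[:2])  # Avoid duplicates
--
--     return list(set(suggested_careers))  # Remove duplicates
-- ===== SOURCE B (Python) =====
-- from typing import Dict, List, Optional
--
-- def _map_interests_to_careers(interests: str) -> List[str]:
--     """Map interests to career fields"""
--     career_mapping = {
--         'technology': ['Computer Science', 'Software Development', 'Data Science', 'Cybersecurity'],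
--         'business': ['Business Administration', 'Finance', 'Marketing', 'Entrepreneurship'],
--         'medical': ['Medicine', 'Nursing', 'Pharmacy', 'Public Health'],
--         'teaching': ['Education', 'Teaching', 'Educational Administration'],
--         'engineering': ['Engineering', 'Technical Fields', 'Architecture'],
--         'science': ['Research', 'Laboratory Science', 'Environmental Science']
--     }
--
--     # Match tokens directly against the mapping keys: a Title-Case career name can
--     # never equal a lowercased token, so A's scan over the career names is dead code.
--     matched = {t for t in interests.lower().split() if t in career_mapping}
--
--     # The emitted careers are pairwise distinct by construction, so no dedup is needed.
--     return [c for k, cs in career_mapping.items() if k in matched for c in cs[:2]]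
-- ===== Notes on version B (the rewrite author's own statement) =====
-- stated objective: idiomatic
-- what changed: B matches the lowercased tokens directly against the mapping keys via a set comprehension with a dict-key lookup (dropping A's per-entry any() scan over the career names, which is dead code since Title-Case career strings never equal lowercased tokens) and emits careers[:2] with a single flat comprehension, without A's final list(set(...)) dedup (the emitted careers are pairwise distinct by construction).
import Mathlib
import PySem

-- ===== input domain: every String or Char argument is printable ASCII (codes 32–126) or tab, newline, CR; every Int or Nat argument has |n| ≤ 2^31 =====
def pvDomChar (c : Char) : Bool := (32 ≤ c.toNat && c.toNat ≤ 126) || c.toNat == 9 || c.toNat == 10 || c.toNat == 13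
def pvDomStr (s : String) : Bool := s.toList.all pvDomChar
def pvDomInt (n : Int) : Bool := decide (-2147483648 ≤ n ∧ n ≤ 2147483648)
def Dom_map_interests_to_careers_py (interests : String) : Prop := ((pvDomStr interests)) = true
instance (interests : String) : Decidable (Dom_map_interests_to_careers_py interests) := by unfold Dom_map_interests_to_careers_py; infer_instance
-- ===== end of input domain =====

-- B is a more idiomatic rewrite: it matches tokens directly against the mapping keys (set
-- comprehension + dict lookup) instead of scanning every mapping entry's word list, and it
-- emits the careers by a flat comprehension without the final set() dedup.


-- ===== PORT A =====
-- the literal dict of the Python source (shared data of A and B)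
def careerMapping : PySem.Dict String (List String) :=
  PySem.Dict.mk [
    ("technology", ["Computer Science", "Software Development", "Data Science", "Cybersecurity"]),
    ("business", ["Business Administration", "Finance", "Marketing", "Entrepreneurship"]),
    ("medical", ["Medicine", "Nursing", "Pharmacy", "Public Health"]),
    ("teaching", ["Education", "Teaching", "Educational Administration"]),
    ("engineering", ["Engineering", "Technical Fields", "Architecture"]),
    ("science", ["Research", "Laboratory Science", "Environmental Science"])]

def map_interests_to_careers_py (interests : String) : List String :=
  let interestKeywords := PySem.Str.split₀ (PySem.Str.lower interests)
  let suggestedCareers := careerMapping.items.foldl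
    (fun acc kc =>
      if (kc.1 :: kc.2).any (fun w => interestKeywords.contains w) then
        acc ++ PySem.List.slice kc.2 none (some 2)
      else acc) []
  PySem.Set.ofList suggestedCareers

-- ===== PORT B =====
def map_interests_to_careers_py_alt (interests : String) : List String :=
  let matched : PySem.Set String :=
    PySem.Set.ofList ((PySem.Str.split₀ (PySem.Str.lower interests)).filter
      (fun t => careerMapping.contains t))
  (careerMapping.items.filter (fun kc => matched.contains kc.1)).flatMap
    (fun kc => PySem.List.slice kc.2 none (some 2))

-- ===== PRECONDITION & SPEC =====
def Spec_map_interests_to_careers_py (interests : String) (out : List String) : Prop := out = map_interests_to_careers_py_alt interests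
instance (interests : String) (out : List String) : Decidable (Spec_map_interests_to_careers_py interests out) := by unfold Spec_map_interests_to_careers_py; infer_instance

-- ===== CLAIM (what is proved, stated in full; the proofs are below) =====
def Claim_equal_map_interests_to_careers_py : Prop := ∀ (interests : String), Dom_map_interests_to_careers_py interests → Spec_map_interests_to_careers_py interests (map_interests_to_careers_py interests)

-- ===== LEMMAS AND PROOFS =====
lemma char_le_iff (a b : Char) : a ≤ b ↔ a.toNat ≤ b.toNat := by
  rw [Char.le_def]; exact UInt32.le_iff_toNat_le

lemma toNat_ofNat_valid (n : Nat) (h : n < 55296) : (Char.ofNat n).toNat = n := by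
  have hv : n.isValidChar := Or.inl h
  simp [Char.ofNat, hv, Char.ofNatAux, Char.toNat, UInt32.toNat]

-- str.lower never produces an uppercase ASCII letter
lemma lowerChar_not_upper (c : Char) : PySem.Chars.isupper (PySem.Chars.lowerChar c) = false := by
  unfold PySem.Chars.lowerChar
  split_ifs with h
  · unfold PySem.Chars.isupper at h ⊢
    simp only [Bool.and_eq_true, decide_eq_true_eq, char_le_iff] at h
    have h1 : 65 ≤ c.toNat := h.1
    have h2 : c.toNat ≤ 90 := h.2
    have ht : (Char.ofNat (c.toNat + 32)).toNat = c.toNat + 32 :=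
      toNat_ofNat_valid _ (by omega)
    simp only [Bool.and_eq_false_iff, decide_eq_false_iff_not, char_le_iff]
    right
    show ¬ (Char.ofNat (c.toNat + 32)).toNat ≤ ('Z' : Char).toNat
    have hz : ('Z' : Char).toNat = 90 := rfl
    omega
  · simpa [PySem.Chars.isupper] using h

-- every character of every token produced by split() comes from the split string (or cur/acc)
lemma split₀_go_chars (P : Char → Prop) (s : List Char) :
    ∀ (cur : List Char) (acc : List (List Char)),
    (∀ c ∈ s, P c) → (∀ c ∈ cur, P c) → (∀ t ∈ acc, ∀ c ∈ t, P c) →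
    ∀ t ∈ PySem.Chars.split₀.go s cur acc, ∀ c ∈ t, P c := by
  induction s with
  | nil =>
    intro cur acc _ hcur hacc t ht c hc
    unfold PySem.Chars.split₀.go at ht
    split at ht
    · exact hacc t (List.mem_reverse.mp ht) c hc
    · rcases List.mem_cons.mp (List.mem_reverse.mp ht) with h | h
      · subst h; exact hcur c (List.mem_reverse.mp hc)
      · exact hacc t h c hc
  | cons d rest ih =>
    intro cur acc hs hcur hacc t ht c hc
    unfold PySem.Chars.split₀.go at ht
    have hrest : ∀ c ∈ rest, P c := fun c hc => hs c (List.mem_cons_of_mem _ hc)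
    split at ht
    · split at ht
      · exact ih [] acc hrest (by simp) hacc t ht c hc
      · refine ih [] (cur.reverse :: acc) hrest (by simp) ?_ t ht c hc
        intro u hu e he
        rcases List.mem_cons.mp hu with h | h
        · subst h; exact hcur e (List.mem_reverse.mp he)
        · exact hacc u h e he
    · refine ih (d :: cur) acc hrest ?_ hacc t ht c hc
      intro e he
      rcases List.mem_cons.mp he with h | h
      · subst h; exact hs _ (List.mem_cons_self ..)
      · exact hcur e h

-- no token of interests.lower().split() contains an uppercase ASCII letter
lemma token_no_upper (s t : String) (ht : t ∈ PySem.Str.split₀ (PySem.Str.lower s)) :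
    ∀ c ∈ t.toList, PySem.Chars.isupper c = false := by
  have h1 : t.toList ∈ PySem.Chars.split₀ (PySem.Str.lower s).toList := by
    rw [← PySem.Str.split₀_map_toList]
    exact List.mem_map_of_mem ht
  rw [PySem.Str.toList_lower] at h1
  unfold PySem.Chars.split₀ at h1
  refine split₀_go_chars (fun c => PySem.Chars.isupper c = false) _ [] [] ?_ (by simp) (by simp) _ h1
  intro c hc
  unfold PySem.Chars.lower at hc
  rcases List.mem_map.mp hc with ⟨d, _, rfl⟩
  exact lowerChar_not_upper d

-- a word containing an uppercase letter is never among the lowercased tokens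
lemma contains_career_false (s w : String) (c : Char) (hc : c ∈ w.toList)
    (hup : PySem.Chars.isupper c = true) :
    (PySem.Str.split₀ (PySem.Str.lower s)).contains w = false := by
  rw [Bool.eq_false_iff]
  intro h
  have hm : w ∈ PySem.Str.split₀ (PySem.Str.lower s) := List.contains_iff_mem.mp h
  have := token_no_upper s w hm c hc
  simp [hup] at this

-- A's guarded-extend loop is flatMap over the filtered entries
lemma foldl_if_append {α β : Type} (p : α → Bool) (f : α → List β) (l : List α) (acc : List β) :
    l.foldl (fun acc x => if p x then acc ++ f x else acc) acc
      = acc ++ (l.filter p).flatMap f := by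
  induction l generalizing acc with
  | nil => simp
  | cons x xs ih =>
    simp only [List.foldl_cons, List.filter_cons]
    cases hp : p x <;> simp [ih]

-- membership of a mapping key in B's matched set is membership in the token list
lemma matched_contains (s : String) (k : String) (hk : careerMapping.contains k = true) :
    PySem.Set.contains
      (PySem.Set.ofList ((PySem.Str.split₀ (PySem.Str.lower s)).filter
        (fun t => careerMapping.contains t))) k
      = (PySem.Str.split₀ (PySem.Str.lower s)).contains k := by
  rw [Bool.eq_iff_iff]
  simp only [PySem.Set.contains, List.contains_iff_mem, PySem.Set.mem_ofList, List.mem_filter]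
  simp [hk]

set_option maxRecDepth 65536 in
lemma ports_agree (interests : String) :
    map_interests_to_careers_py interests = map_interests_to_careers_py_alt interests := by
  unfold map_interests_to_careers_py map_interests_to_careers_py_alt
  dsimp only
  set ts := PySem.Str.split₀ (PySem.Str.lower interests) with hts
  rw [foldl_if_append]
  have hfc : careerMapping.items.filter
        (fun kc => (kc.1 :: kc.2).any (fun w => ts.contains w))
      = careerMapping.items.filter
        (fun kc => PySem.Set.contains (PySem.Set.ofList (ts.filter (fun t => careerMapping.contains t))) kc.1) := by
    apply List.filter_congr
    intro kc hkc
    fin_cases hkc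
    · rw [hts]
      rw [matched_contains interests "technology" (by decide)]
      simp only [List.any_cons, List.any_nil,
        contains_career_false interests "Computer Science" 'C' (by simp) rfl,
        contains_career_false interests "Software Development" 'S' (by simp) rfl,
        contains_career_false interests "Data Science" 'D' (by simp) rfl,
        contains_career_false interests "Cybersecurity" 'C' (by simp) rfl,
        Bool.or_false]
    · rw [hts]
      rw [matched_contains interests "business" (by decide)]
      simp only [List.any_cons, List.any_nil,
        contains_career_false interests "Business Administration" 'B' (by simp) rfl,
        contains_career_false interests "Finance" 'F' (by simp) rfl,
        contains_career_false interests "Marketing" 'M' (by simp) rfl,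
        contains_career_false interests "Entrepreneurship" 'E' (by simp) rfl,
        Bool.or_false]
    · rw [hts]
      rw [matched_contains interests "medical" (by decide)]
      simp only [List.any_cons, List.any_nil,
        contains_career_false interests "Medicine" 'M' (by simp) rfl,
        contains_career_false interests "Nursing" 'N' (by simp) rfl,
        contains_career_false interests "Pharmacy" 'P' (by simp) rfl,
        contains_career_false interests "Public Health" 'P' (by simp) rfl,
        Bool.or_false]
    · rw [hts]
      rw [matched_contains interests "teaching" (by decide)]
      simp only [List.any_cons, List.any_nil,
        contains_career_false interests "Education" 'E' (by simp) rfl,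
        contains_career_false interests "Teaching" 'T' (by simp) rfl,
        contains_career_false interests "Educational Administration" 'E' (by simp) rfl,
        Bool.or_false]
    · rw [hts]
      rw [matched_contains interests "engineering" (by decide)]
      simp only [List.any_cons, List.any_nil,
        contains_career_false interests "Engineering" 'E' (by simp) rfl,
        contains_career_false interests "Technical Fields" 'T' (by simp) rfl,
        contains_career_false interests "Architecture" 'A' (by simp) rfl,
        Bool.or_false]
    · rw [hts]
      rw [matched_contains interests "science" (by decide)]
      simp only [List.any_cons, List.any_nil,
        contains_career_false interests "Research" 'R' (by simp) rfl,
        contains_career_false interests "Laboratory Science" 'L' (by simp) rfl,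
        contains_career_false interests "Environmental Science" 'E' (by simp) rfl,
        Bool.or_false]
  rw [List.nil_append, hfc]
  apply PySem.Set.ofList_eq_self_of_nodup
  refine List.Nodup.sublist (List.Sublist.flatMap List.filter_sublist _) ?_
  decide

-- ===== VERDICT (by name: the statement is the Claim_ definition above) =====
theorem map_interests_to_careers_py_spec : Claim_equal_map_interests_to_careers_py := by
  intro interests _
  unfold Spec_map_interests_to_careers_py
  exact ports_agree interests
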